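-- pv_equiv track=rewrite | github.com/JoanMora/code-practise | Python/Basics/Codewar_Optimization/codewar_optimization.py | codewar_result
-- ===== SOURCE A (Python) =====
-- def codewar_result (codewarrior, opponent) :
--     codewarrior.sort()
--     opponent.sort(reverse=True)
--     cod_warriors = codewarrior.copy()
--     num_of_armies = len(codewarrior)
--     score = 0
--
--
--     for army in cod_warriors:
--         inferiors = [e for e in opponent if e < army]
--         if(inferiors):
--             score += 1
--             element = inferiors.pop(0)
--             opponent.pop(opponent.index(element))
--             codewarrior.pop(codewarrior.index(army))
--
--     # compute stalmates
--     stalemate = [opponent.pop(opponent.index(army)) for army in codewarrior if army in opponent]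
--     stalemate = len(stalemate)
--
--     imbalance = (num_of_armies - stalemate) - score
--     if(score>imbalance): return "Victory"
--     if(score==imbalance): return "Stalemate"
--     return "Defeat"
-- ===== SOURCE B (Python) =====
-- def codewar_result(codewarrior, opponent):
--     # Sorted two-pointer greedy with a stack (O(n log n)); return-value equivalent
--     # to A (A additionally mutates its argument lists; B does not).
--     ws = sorted(codewarrior)
--     opp = sorted(opponent)
--     stack, losers = [], []
--     score = p = 0
--     for w in ws:
--         while p < len(opp) and opp[p] < w:
--             stack.append(opp[p])
--             p += 1
--         if stack:
--             stack.pop()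
--             score += 1
--         else:
--             losers.append(w)
--     remaining = stack + opp[p:]  # still sorted ascending
--     i = j = stalemate = 0
--     while i < len(losers) and j < len(remaining):
--         if losers[i] == remaining[j]:
--             stalemate += 1; i += 1; j += 1
--         elif losers[i] < remaining[j]:
--             i += 1
--         else:
--             j += 1
--     imbalance = len(ws) - stalemate - score
--     if score > imbalance: return "Victory"
--     if score == imbalance: return "Stalemate"
--     return "Defeat"
-- ===== Notes on version B (the rewrite author's own statement) =====
-- stated objective: faster
-- what changed: Replaces A's quadratic loop of list-filter/index/pop scans by sorting both armies ascending once and running a two-pointer stack greedy for wins plus a linear merge walk over the two sorted remainders for ties.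
import Mathlib
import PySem

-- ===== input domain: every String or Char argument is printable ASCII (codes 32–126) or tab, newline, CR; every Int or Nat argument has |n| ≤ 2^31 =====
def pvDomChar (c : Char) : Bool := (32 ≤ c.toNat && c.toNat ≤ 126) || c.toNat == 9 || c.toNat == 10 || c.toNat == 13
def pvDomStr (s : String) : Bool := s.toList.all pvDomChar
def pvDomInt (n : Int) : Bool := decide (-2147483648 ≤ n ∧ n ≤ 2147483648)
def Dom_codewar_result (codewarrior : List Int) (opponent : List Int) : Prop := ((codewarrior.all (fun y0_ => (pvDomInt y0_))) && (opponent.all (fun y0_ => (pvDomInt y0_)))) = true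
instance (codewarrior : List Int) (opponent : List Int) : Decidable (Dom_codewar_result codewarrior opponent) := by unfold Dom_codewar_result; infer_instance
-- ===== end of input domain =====

-- B replaces A's quadratic pop/index battle loop by a sorted two-pointer stack greedy and a
-- merge walk for ties (return value only: A also sorts/pops its argument lists in place, B does not).

-- ===== PORT A =====
-- the for-loop over cod_warriors: state (codewarrior, opponent, score);
-- list.pop(list.index(x)) removes the first occurrence of x = List.erase (x is always a member here, so Python never raises)
def pvA_battle : List Int → List Int × List Int × Int → List Int × List Int × Int
  | [], st => st
  | army :: rest, (cw, opp, score) =>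
    let inferiors := opp.filter (fun e => decide (e < army))
    match inferiors with
    | [] => pvA_battle rest (cw, opp, score)
    | element :: _ => pvA_battle rest (cw.erase army, opp.erase element, score + 1)

-- the stalemate list comprehension: builds the list of popped opponents while mutating opponent
def pvA_stale : List Int → List Int → List Int × List Int
  | [], opp => (opp, [])
  | army :: rest, opp =>
    if army ∈ opp then
      let r := pvA_stale rest (opp.erase army)
      (r.1, army :: r.2)
    else pvA_stale rest opp

def codewar_result (codewarrior : List Int) (opponent : List Int) : String :=
  let cw0 := PySem.List.sorted codewarrior (fun x => x) false
  let opp0 := PySem.List.sorted opponent (fun x => x) true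
  let num_of_armies : Int := (cw0.length : Int)
  match pvA_battle cw0 (cw0, opp0, 0) with
  | (cwF, oppF, score) =>
    let stalemate : Int := ((pvA_stale cwF oppF).2.length : Int)
    let imbalance := (num_of_armies - stalemate) - score
    if score > imbalance then "Victory"
    else if score = imbalance then "Stalemate"
    else "Defeat"

-- ===== PORT B =====
-- the inner while loop: push opponents below w from the suffix onto the stack
def pvB_push (w : Int) : List Int → List Int → List Int × List Int
  | stack, [] => (stack, [])
  | stack, o :: os => if o < w then pvB_push w (stack ++ [o]) os else (stack, o :: os)

-- the for-loop over ws: state (stack, suffix, score, losers); stack.pop() = dropLast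
def pvB_fight : List Int → List Int → List Int → Int → List Int → List Int × List Int × Int × List Int
  | [], stack, suffix, score, losers => (stack, suffix, score, losers)
  | w :: ws, stack, suffix, score, losers =>
    match pvB_push w stack suffix with
    | (st, sf) =>
      if st.isEmpty then pvB_fight ws st sf score (losers ++ [w])
      else pvB_fight ws st.dropLast sf (score + 1) losers

-- the tie-counting merge walk over the two sorted lists
def pvB_merge : List Int → List Int → Int
  | x :: xs, y :: ys =>
    if x = y then 1 + pvB_merge xs ys
    else if x < y then pvB_merge xs (y :: ys)
    else pvB_merge (x :: xs) ys
  | _, [] => 0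
  | [], _ => 0
termination_by l r => l.length + r.length

def codewar_result_alt (codewarrior : List Int) (opponent : List Int) : String :=
  let ws := PySem.List.sorted codewarrior (fun x => x) false
  let opp := PySem.List.sorted opponent (fun x => x) false
  match pvB_fight ws [] opp 0 [] with
  | (stack, suffix, score, losers) =>
    let remaining := stack ++ suffix
    let stalemate := pvB_merge losers remaining
    let imbalance := ((ws.length : Int) - stalemate) - score
    if score > imbalance then "Victory"
    else if score = imbalance then "Stalemate"
    else "Defeat"

-- ===== PRECONDITION & SPEC =====
def Spec_codewar_result (codewarrior : List Int) (opponent : List Int) (out : String) : Prop := out = codewar_result_alt codewarrior opponent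
instance (codewarrior : List Int) (opponent : List Int) (out : String) : Decidable (Spec_codewar_result codewarrior opponent out) := by unfold Spec_codewar_result; infer_instance

-- ===== CLAIM (what is proved, stated in full; the proofs are below) =====
def Claim_equal_codewar_result : Prop := ∀ (codewarrior : List Int) (opponent : List Int), Dom_codewar_result codewarrior opponent → Spec_codewar_result codewarrior opponent (codewar_result codewarrior opponent)

-- ===== LEMMAS AND PROOFS =====

-- pvB_push computes takeWhile/dropWhile
theorem pvB_push_eq (w : Int) (stack suffix : List Int) :
    pvB_push w stack suffix
      = (stack ++ suffix.takeWhile (fun o => decide (o < w)),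
         suffix.dropWhile (fun o => decide (o < w))) := by
  induction suffix generalizing stack with
  | nil => simp [pvB_push]
  | cons o os ih =>
    by_cases h : o < w
    · simp [pvB_push, h, ih]
    · simp [pvB_push, h]

-- on a sorted list, filtering (< w) is takeWhile (< w)
theorem filter_eq_takeWhile_of_sorted (w : Int) (l : List Int)
    (hs : List.Pairwise (· ≤ ·) l) :
    l.filter (fun o => decide (o < w)) = l.takeWhile (fun o => decide (o < w)) := by
  induction l with
  | nil => rfl
  | cons x xs ih =>
    rcases List.pairwise_cons.mp hs with ⟨hx, hxs⟩
    by_cases h : x < w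
    · simp [h, ih hxs]
    · have hxsf : xs.filter (fun o => decide (o < w)) = [] :=
        List.filter_eq_nil_iff.mpr
          (fun y hy => by simpa using fun hlt => h (lt_of_le_of_lt (hx y hy) hlt))
      simp [h, hxsf]

-- every element of dropWhile (< w) of a sorted list is ≥ w
theorem dropWhile_ge_of_sorted (w : Int) (l : List Int)
    (hs : List.Pairwise (· ≤ ·) l) :
    ∀ y ∈ l.dropWhile (fun o => decide (o < w)), w ≤ y := by
  induction l with
  | nil => intro y hy; simp [List.dropWhile] at hy
  | cons x xs ih =>
    rcases List.pairwise_cons.mp hs with ⟨hx, hxs⟩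
    by_cases h : x < w
    · simpa [List.dropWhile_cons, h] using ih hxs
    · intro y hy
      simp only [List.dropWhile_cons, decide_eq_true_eq, if_neg h] at hy
      rcases List.mem_cons.mp hy with rfl | hy
      · omega
      · exact le_trans (not_lt.mp h) (hx y hy)

-- erasing the first occurrence of w from sorted losers ++ w :: rest yields losers ++ rest
theorem erase_middle_sorted (losers rest : List Int) (w : Int)
    (h : List.Pairwise (· ≤ ·) (losers ++ w :: rest)) :
    (losers ++ w :: rest).erase w = losers ++ rest := by
  apply List.Perm.eq_of_pairwise (le := fun a b : Int => a ≤ b)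
  · exact fun a b _ _ h1 h2 => le_antisymm h1 h2
  · exact List.Pairwise.sublist List.erase_sublist h
  · exact List.Pairwise.sublist ((List.append_sublist_append_left losers).mpr (List.sublist_cons_self w rest)) h
  · exact ((List.perm_middle).erase w).trans (by rw [List.erase_cons_head])

-- the main loop correspondence: A's battle loop simulates B's stack loop step for step,
-- and the loop keeps losers and stack ++ suffix sorted
theorem battle_eq_fight (ws : List Int) : ∀ (stack suffix losers : List Int) (score : Int),
    List.Pairwise (· ≤ ·) (losers ++ ws) →
    List.Pairwise (· ≤ ·) (stack ++ suffix) →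
    (∀ x ∈ stack, ∀ w ∈ ws, x < w) →
    pvA_battle ws (losers ++ ws, (stack ++ suffix).reverse, score)
      = ((pvB_fight ws stack suffix score losers).2.2.2,
         ((pvB_fight ws stack suffix score losers).1
            ++ (pvB_fight ws stack suffix score losers).2.1).reverse,
         (pvB_fight ws stack suffix score losers).2.2.1)
    ∧ List.Pairwise (· ≤ ·) ((pvB_fight ws stack suffix score losers).2.2.2)
    ∧ List.Pairwise (· ≤ ·) ((pvB_fight ws stack suffix score losers).1
            ++ (pvB_fight ws stack suffix score losers).2.1) := by
  induction ws with
  | nil =>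
    intro stack suffix losers score h1 h2 _
    refine ⟨by simp [pvA_battle, pvB_fight], ?_, ?_⟩
    · simpa [pvB_fight] using h1
    · simpa [pvB_fight] using h2
  | cons w rest ih =>
    intro stack suffix losers score h1 h2 h3
    have hsfx : List.Pairwise (· ≤ ·) suffix :=
      List.Pairwise.sublist (List.sublist_append_right stack suffix) h2
    have hstw : ∀ x ∈ stack, x < w := fun x hx => h3 x hx w List.mem_cons_self
    set T := suffix.takeWhile (fun o => decide (o < w)) with hT
    set D := suffix.dropWhile (fun o => decide (o < w)) with hD
    have hTD : suffix = T ++ D := (List.takeWhile_append_dropWhile).symm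
    have hpush : pvB_push w stack suffix = (stack ++ T, D) := pvB_push_eq w stack suffix
    have hfil : (stack ++ suffix).filter (fun e => decide (e < w)) = stack ++ T := by
      rw [List.filter_append,
          List.filter_eq_self.mpr (fun a ha => by simpa using hstw a ha),
          filter_eq_takeWhile_of_sorted w suffix hsfx]
    have hinf : ((stack ++ suffix).reverse).filter (fun e => decide (e < w))
        = (stack ++ T).reverse := by rw [List.filter_reverse, hfil]
    have hwle : ∀ w' ∈ rest, w ≤ w' := by
      have := (List.pairwise_append.mp h1).2.1
      exact (List.pairwise_cons.mp this).1
    have hstT : ∀ x ∈ stack ++ T, x < w := by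
      intro x hx
      rcases List.mem_append.mp hx with hx | hx
      · exact hstw x hx
      · simpa using List.mem_takeWhile_imp hx
    have hD_ge : ∀ y ∈ D, w ≤ y := dropWhile_ge_of_sorted w suffix hsfx
    rcases List.eq_nil_or_concat (stack ++ T) with hnil | ⟨q, e, hqe⟩
    · -- no beatable opponent: w becomes a loser
      rcases List.append_eq_nil_iff.mp hnil with ⟨hsnil, hTnil⟩
      have hsfD : stack ++ suffix = D := by rw [hsnil, hTD, hTnil]; simp
      have h1' : List.Pairwise (· ≤ ·) ((losers ++ [w]) ++ rest) := by
        rw [List.append_assoc]; simpa using h1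
      have h2' : List.Pairwise (· ≤ ·) (([] : List Int) ++ D) := by
        simpa [hsfD] using h2
      have h3' : ∀ x ∈ ([] : List Int), ∀ w' ∈ rest, x < w' := by simp
      have hrec := ih [] D (losers ++ [w]) score h1' h2' h3'
      have hfilD : List.filter (fun e => decide (e < w)) D.reverse = [] := by
        rw [← hsfD, hinf, hnil, List.reverse_nil]
      have hA : pvA_battle (w :: rest) (losers ++ w :: rest, (stack ++ suffix).reverse, score)
          = pvA_battle rest ((losers ++ [w]) ++ rest, (([] : List Int) ++ D).reverse, score) := by
        simp only [pvA_battle, hsfD, hfilD, List.append_assoc, List.nil_append,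
          List.singleton_append]
      have hB : pvB_fight (w :: rest) stack suffix score losers
          = pvB_fight rest [] D score (losers ++ [w]) := by
        simp [pvB_fight, hpush, hnil]
      rw [hA, hB]
      exact hrec
    · -- w beats e, the largest opponent below w
      have he_lt : e < w := hstT e (by rw [hqe]; simp)
      have he_nD : e ∉ D := fun hm => absurd (hD_ge e hm) (not_le.mpr he_lt)
      have hrevqe : (stack ++ T).reverse = e :: q.reverse := by rw [hqe]; simp
      have hoppsplit : (stack ++ suffix).reverse = D.reverse ++ (e :: q.reverse) := by
        rw [hTD, ← List.append_assoc, hqe]; simp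
      have herase : ((stack ++ suffix).reverse).erase e = (q ++ D).reverse := by
        rw [hoppsplit, List.erase_append_right _ (by simpa using he_nD),
            List.erase_cons_head]
        simp
      have hcw : (losers ++ w :: rest).erase w = losers ++ rest :=
        erase_middle_sorted losers rest w h1
      have h1' : List.Pairwise (· ≤ ·) (losers ++ rest) :=
        List.Pairwise.sublist
          ((List.append_sublist_append_left losers).mpr (List.sublist_cons_self w rest)) h1
      have hqD_sub : (q ++ D).Sublist (stack ++ suffix) := by
        rw [hTD, ← List.append_assoc, hqe]
        exact List.Sublist.append_right (by simp) D
      have h2' : List.Pairwise (· ≤ ·) (q ++ D) := List.Pairwise.sublist hqD_sub h2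
      have h3' : ∀ x ∈ q, ∀ w' ∈ rest, x < w' := by
        intro x hx w' hw'
        have : x < w := hstT x (by rw [hqe]; simp [hx])
        exact lt_of_lt_of_le this (hwle w' hw')
      have hrec := ih q D losers (score + 1) h1' h2' h3'
      have hA : pvA_battle (w :: rest) (losers ++ w :: rest, (stack ++ suffix).reverse, score)
          = pvA_battle rest (losers ++ rest, (q ++ D).reverse, score + 1) := by
        simp only [pvA_battle, hinf, hrevqe, hcw, herase]
      have hB : pvB_fight (w :: rest) stack suffix score losers
          = pvB_fight rest q D (score + 1) losers := by
        have : (stack ++ T).isEmpty = false := by rw [hqe]; simp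
        simp [pvB_fight, hpush, hqe]
      rw [hA, hB]
      exact hrec

-- A's stalemate list counts the bag intersection
theorem stale_length_eq_bagInter (l opp : List Int) :
    (pvA_stale l opp).2.length = (l.bagInter opp).length := by
  induction l generalizing opp with
  | nil => simp [pvA_stale]
  | cons a rest ih =>
    by_cases h : a ∈ opp
    · simp [pvA_stale, h, List.cons_bagInter_of_pos _ h, ih]
    · simp [pvA_stale, h, List.cons_bagInter_of_neg _ h, ih]

theorem bagInter_cons_right_of_not_mem {a : Int} (l₁ l₂ : List Int) (h : a ∉ l₁) :
    l₁.bagInter (a :: l₂) = l₁.bagInter l₂ := by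
  induction l₁ generalizing l₂ with
  | nil => simp
  | cons b l ih =>
    have hba : b ≠ a := fun hba => h (hba ▸ List.mem_cons_self)
    have ha : a ∉ l := fun hal => h (List.mem_cons_of_mem _ hal)
    by_cases hb : b ∈ l₂
    · rw [List.cons_bagInter_of_pos _ (List.mem_cons_of_mem _ hb),
          List.cons_bagInter_of_pos _ hb,
          List.erase_cons_tail (by simpa using Ne.symm hba)]
      congr 1
      exact ih _ ha
    · have : b ∉ a :: l₂ := by simp [hba, hb]
      rw [List.cons_bagInter_of_neg _ this, List.cons_bagInter_of_neg _ hb, ih _ ha]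

-- the merge walk counts the bag intersection of two sorted lists
theorem merge_eq_bagInter (l : List Int) (hl : List.Pairwise (· ≤ ·) l) :
    ∀ r : List Int, List.Pairwise (· ≤ ·) r →
      pvB_merge l r = ((l.bagInter r).length : Int) := by
  induction l with
  | nil => intro r _; cases r <;> simp [pvB_merge]
  | cons x xs ihl =>
    rcases List.pairwise_cons.mp hl with ⟨hx, hxs⟩
    intro r
    induction r with
    | nil => intro _; simp [pvB_merge]
    | cons y ys ihr =>
      intro hr
      rcases List.pairwise_cons.mp hr with ⟨hy, hys⟩
      by_cases hxy : x = y
      · subst hxy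
        rw [List.cons_bagInter_of_pos _ List.mem_cons_self, List.erase_cons_head]
        simp only [pvB_merge, ihl hxs ys hys, List.length_cons]
        push_cast; ring
      · by_cases hlt : x < y
        · have hnm : x ∉ y :: ys := by
            intro hm
            rcases List.mem_cons.mp hm with rfl | hm
            · exact hxy rfl
            · exact absurd (hy x hm) (not_le.mpr hlt)
          rw [List.cons_bagInter_of_neg _ hnm]
          simp only [pvB_merge, if_neg hxy, if_pos hlt]
          exact ihl hxs (y :: ys) hr
        · have hylt : y < x := lt_of_le_of_ne (not_lt.mp hlt) (Ne.symm hxy)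
          have hnm : y ∉ x :: xs := by
            intro hm
            rcases List.mem_cons.mp hm with rfl | hm
            · exact hxy rfl
            · exact absurd (hx y hm) (not_le.mpr hylt)
          rw [bagInter_cons_right_of_not_mem _ _ hnm]
          simp only [pvB_merge, if_neg hxy, if_neg hlt]
          exact ihr hys

-- sorted with reverse=True is the reverse of the ascending sort (ties of equal ints are indistinguishable)
theorem sorted_rev_eq_reverse (xs : List Int) :
    PySem.List.sorted xs (fun x => x) true = (PySem.List.sorted xs (fun x => x) false).reverse := by
  apply List.Perm.eq_of_pairwise (le := fun a b : Int => b ≤ a)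
  · exact fun a b _ _ h1 h2 => le_antisymm h2 h1
  · simpa using PySem.List.sorted_pairwise_rev xs (fun x => x)
  · rw [List.pairwise_reverse]; simpa using PySem.List.sorted_pairwise xs (fun x => x)
  · exact (PySem.List.sorted_perm ..).trans ((List.reverse_perm _).trans (PySem.List.sorted_perm ..)).symm

-- ===== VERDICT (by name: the statement is the Claim_ definition above) =====
theorem codewar_result_spec : Claim_equal_codewar_result := by
  intro codewarrior opponent _
  unfold Spec_codewar_result
  rcases hpv : pvB_fight (PySem.List.sorted codewarrior (fun x => x) false)
      [] (PySem.List.sorted opponent (fun x => x) false) 0 [] with ⟨st, sf, sc, lo⟩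
  have hA : List.Pairwise (· ≤ ·) (PySem.List.sorted codewarrior (fun x => x) false) := by
    simpa using PySem.List.sorted_pairwise codewarrior (fun x => x)
  have hO : List.Pairwise (· ≤ ·) (PySem.List.sorted opponent (fun x => x) false) := by
    simpa using PySem.List.sorted_pairwise opponent (fun x => x)
  have hmain := battle_eq_fight (PySem.List.sorted codewarrior (fun x => x) false)
    [] (PySem.List.sorted opponent (fun x => x) false) [] 0
    (by simpa using hA) (by simpa using hO) (by simp)
  rw [hpv] at hmain
  rcases hmain with ⟨heq, hplos, hpst⟩
  simp only [List.nil_append] at heq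
  have hst : ((pvA_stale lo ((st ++ sf).reverse)).2.length : Int) = pvB_merge lo (st ++ sf) := by
    rw [stale_length_eq_bagInter, merge_eq_bagInter lo hplos (st ++ sf) hpst,
        List.Perm.bagInter_left lo (List.reverse_perm (st ++ sf))]
  simp only [codewar_result, codewar_result_alt, sorted_rev_eq_reverse, hpv, heq, hst]
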